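-- pv_equiv track=rewrite | github.com/Nikhil135246/Ai-Recommendation- | main.py | manual_parse_response
-- ===== SOURCE A (Python) =====
-- from typing import List, Dict, Optional
--
-- def manual_parse_response(response: str) -> List[Dict]:
--     """Manually parse response if JSON parsing fails"""
--     tools = []
--     lines = response.split('\n')
--
--     current_tool = {}
--     for line in lines:
--         if 'name:' in line.lower() or 'tool:' in line.lower():
--             if current_tool:
--                 tools.append(current_tool)
--                 current_tool = {}
--             current_tool['name'] = line.split(':', 1)[1].strip()
--         elif 'link:' in line.lower() or 'url:' in line.lower():
--             current_tool['link'] = line.split(':', 1)[1].strip()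
--         elif 'description:' in line.lower():
--             current_tool['description'] = line.split(':', 1)[1].strip()
--
--     if current_tool:
--         tools.append(current_tool)
--
--     return tools
-- ===== SOURCE B (Python) =====
-- from typing import List, Dict
--
-- def _key(line: str):
--     """Which field this line sets, with A's precedence; None if it sets nothing."""
--     low = line.lower()
--     if 'name:' in low or 'tool:' in low:
--         return 'name'
--     if 'link:' in low or 'url:' in low:
--         return 'link'
--     if 'description:' in low:
--         return 'description'
--     return None
--
-- def _value(line: str) -> str:
--     return line.split(':', 1)[1].strip()
--
-- def manual_parse_response(response: str) -> List[Dict]: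
--     """Manually parse response if JSON parsing fails"""
--     lines = response.split('\n')
--     # Pass 1: partition the lines into segments: a leading segment of the lines
--     # before the first name/tool boundary, then one segment per boundary line.
--     segments = [[]]
--     for line in lines:
--         if _key(line) == 'name':
--             segments.append([line])
--         else:
--             segments[-1].append(line)
--     # Pass 2: build one record per segment (last write wins), keep non-empty ones.
--     records = ({_key(ln): _value(ln) for ln in seg if _key(ln)} for seg in segments)
--     return [d for d in records if d]
-- ===== Notes on version B (the rewrite author's own statement) =====
-- stated objective: alternative
-- what changed: B replaces A's single flush-on-boundary accumulator loop by two separate passes: first partition the lines into segments at name/tool boundary lines, then build one record per segment with a key/value helper table and keep the non-empty ones.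
import Mathlib
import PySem

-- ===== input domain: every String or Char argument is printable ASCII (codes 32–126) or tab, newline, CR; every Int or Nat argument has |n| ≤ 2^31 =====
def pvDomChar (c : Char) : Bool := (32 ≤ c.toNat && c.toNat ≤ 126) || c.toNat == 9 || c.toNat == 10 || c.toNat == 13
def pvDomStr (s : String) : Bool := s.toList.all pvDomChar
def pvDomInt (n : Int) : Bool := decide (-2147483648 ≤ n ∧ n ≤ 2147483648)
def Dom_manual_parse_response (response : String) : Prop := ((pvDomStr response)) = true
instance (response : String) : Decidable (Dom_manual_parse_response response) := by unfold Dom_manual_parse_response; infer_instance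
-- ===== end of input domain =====

-- B re-implements the parser in two passes (partition the lines into segments at
-- name/tool boundary lines, then build one record per segment) instead of A's
-- single flush-on-boundary accumulator loop; objective: alternative decomposition.


-- ===== PORT A =====
-- line.split(':', 1)[1].strip(); the [1] index is only taken on lines that contain ':'
-- (every branch condition guarantees that), so the .getD "" default is unreachable.
def pvASplitVal (line : String) : String :=
  PySem.Str.strip ((PySem.List.pyGet? ((PySem.Str.splitMax? line ":" 1).getD []) 1).getD "")

def pvAStep (st : List (PySem.Dict String String) × PySem.Dict String String) (line : String) :
    List (PySem.Dict String String) × PySem.Dict String String :=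
  if PySem.Str.isIn "name:" (PySem.Str.lower line) || PySem.Str.isIn "tool:" (PySem.Str.lower line) then
    ((if st.2.items ≠ [] then st.1 ++ [st.2] else st.1),
     PySem.Dict.insert PySem.Dict.empty "name" (pvASplitVal line))
  else if PySem.Str.isIn "link:" (PySem.Str.lower line) || PySem.Str.isIn "url:" (PySem.Str.lower line) then
    (st.1, st.2.insert "link" (pvASplitVal line))
  else if PySem.Str.isIn "description:" (PySem.Str.lower line) then
    (st.1, st.2.insert "description" (pvASplitVal line))
  else st

def manual_parse_response (response : String) : List (List (String × String)) :=
  let lines := (PySem.Str.split? response "\n").getD []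
  let st := lines.foldl pvAStep ([], PySem.Dict.empty)
  let tools := if st.2.items ≠ [] then st.1 ++ [st.2] else st.1
  tools.map (·.items)

-- ===== PORT B =====
-- _key(line): which field the line sets (same precedence as the branch chain), None if none.
def pvKey (line : String) : Option String :=
  let low := PySem.Str.lower line
  if PySem.Str.isIn "name:" low || PySem.Str.isIn "tool:" low then some "name"
  else if PySem.Str.isIn "link:" low || PySem.Str.isIn "url:" low then some "link"
  else if PySem.Str.isIn "description:" low then some "description"
  else none

-- _value(line) = line.split(':', 1)[1].strip(); only evaluated on lines whose key is
-- not None, and those all contain ':', so the .getD "" default is unreachable.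
def pvValue (line : String) : String :=
  PySem.Str.strip ((PySem.List.pyGet? ((PySem.Str.splitMax? line ":" 1).getD []) 1).getD "")

-- one step of Source B's dict comprehension {_key(ln): _value(ln) for ln in seg if _key(ln)}
def pvUpd (d : PySem.Dict String String) (ln : String) : PySem.Dict String String :=
  match pvKey ln with
  | some k => d.insert k (pvValue ln)
  | none => d

def pvRecord (seg : List String) : PySem.Dict String String :=
  seg.foldl pvUpd PySem.Dict.empty

-- pass-1 step: a boundary line opens a new segment, any other line extends the last one
def pvSegStep (segs : List (List String)) (line : String) : List (List String) :=
  if pvKey line == some "name" then segs ++ [[line]]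
  else segs.dropLast ++ [segs.getLastD [] ++ [line]]

def manual_parse_response_alt (response : String) : List (List (String × String)) :=
  let lines := (PySem.Str.split? response "\n").getD []
  let segs := lines.foldl pvSegStep [[]]
  (((segs.map pvRecord).filter (fun d => !d.items.isEmpty)).map (·.items))

-- ===== PRECONDITION & SPEC =====
def Spec_manual_parse_response (response : String) (out : List (List (String × String))) : Prop := out = manual_parse_response_alt response
instance (response : String) (out : List (List (String × String))) : Decidable (Spec_manual_parse_response response out) := by unfold Spec_manual_parse_response; infer_instance

-- ===== CLAIM (what is proved, stated in full; the proofs are below) =====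
def Claim_equal_manual_parse_response : Prop := ∀ (response : String), Dom_manual_parse_response response → Spec_manual_parse_response response (manual_parse_response response)

-- ===== LEMMAS AND PROOFS =====

-- the common recursive characterisation both ports are reduced to
def pvParse (cur : PySem.Dict String String) : List String → List (PySem.Dict String String)
  | [] => if cur.items ≠ [] then [cur] else []
  | l :: rest =>
    if pvKey l == some "name" then
      (if cur.items ≠ [] then [cur] else []) ++ pvParse (pvUpd PySem.Dict.empty l) rest
    else pvParse (pvUpd cur l) rest

lemma pvAStep_eq (tools : List (PySem.Dict String String)) (cur : PySem.Dict String String)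
    (l : String) :
    pvAStep (tools, cur) l =
      if pvKey l == some "name" then
        ((if cur.items ≠ [] then tools ++ [cur] else tools), pvUpd PySem.Dict.empty l)
      else (tools, pvUpd cur l) := by
  simp only [pvAStep, pvUpd, pvValue, pvASplitVal, pvKey]
  split_ifs <;> simp_all

lemma pvA_fold (lines : List String) :
    ∀ (tools : List (PySem.Dict String String)) (cur : PySem.Dict String String),
    (if ((lines.foldl pvAStep (tools, cur)).2.items ≠ [])
       then (lines.foldl pvAStep (tools, cur)).1 ++ [(lines.foldl pvAStep (tools, cur)).2]
       else (lines.foldl pvAStep (tools, cur)).1)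
      = tools ++ pvParse cur lines := by
  induction lines with
  | nil => intro tools cur; simp only [List.foldl_nil, pvParse]; split_ifs <;> simp
  | cons l rest ih =>
    intro tools cur
    simp only [List.foldl_cons, pvAStep_eq, pvParse]
    by_cases h : pvKey l == some "name"
    · simp only [if_pos h]
      rw [ih]
      split_ifs <;> simp
    · simp only [if_neg h]
      rw [ih]

lemma pvGetLastD_append (S T : List (List String)) (hT : T ≠ []) (d : List String) :
    (S ++ T).getLastD d = T.getLastD d := by
  rw [List.getLastD_eq_getLast?, List.getLastD_eq_getLast?, List.getLast?_append_of_ne_nil]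
  exact hT

lemma pvSeg_shift (lines : List String) : ∀ (S T : List (List String)), T ≠ [] →
    lines.foldl pvSegStep (S ++ T) = S ++ lines.foldl pvSegStep T := by
  induction lines with
  | nil => intro S T _; simp
  | cons l rest ih =>
    intro S T hT
    simp only [List.foldl_cons]
    by_cases h : pvKey l == some "name"
    · rw [show pvSegStep (S ++ T) l = S ++ (T ++ [[l]]) from by
          unfold pvSegStep; simp [h],
        show pvSegStep T l = T ++ [[l]] from by unfold pvSegStep; simp [h]]
      exact ih S (T ++ [[l]]) (by simp)
    · rw [show pvSegStep (S ++ T) l = S ++ (T.dropLast ++ [T.getLastD [] ++ [l]]) from by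
          unfold pvSegStep
          rw [if_neg (by simpa using h), List.dropLast_append_of_ne_nil hT,
              pvGetLastD_append S T hT, List.append_assoc],
        show pvSegStep T l = T.dropLast ++ [T.getLastD [] ++ [l]] from by
          unfold pvSegStep; rw [if_neg (by simpa using h)]]
      exact ih S (T.dropLast ++ [T.getLastD [] ++ [l]]) (by simp)

lemma pvB_fold (lines : List String) : ∀ (seg : List String),
    ((lines.foldl pvSegStep [seg]).map pvRecord).filter (fun d => !d.items.isEmpty)
      = pvParse (pvRecord seg) lines := by
  induction lines with
  | nil =>
    intro seg
    simp only [List.foldl_nil, List.map_cons, List.map_nil, pvParse, List.filter]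
    rcases h : (pvRecord seg).items.isEmpty with _ | _ <;>
      simp_all [List.isEmpty_iff]
  | cons l rest ih =>
    intro seg
    simp only [List.foldl_cons]
    by_cases h : pvKey l == some "name"
    · rw [show pvSegStep [seg] l = [seg] ++ [[l]] from by unfold pvSegStep; simp [h],
        pvSeg_shift rest [seg] [[l]] (by simp),
        List.map_append, List.filter_append, ih [l]]
      have hrec : pvRecord [l] = pvUpd PySem.Dict.empty l := rfl
      simp only [pvParse, h, if_true, hrec, List.map_cons, List.map_nil, List.filter]
      rcases hse : (pvRecord seg).items.isEmpty with _ | _ <;>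
        simp_all [List.isEmpty_iff]
    · rw [show pvSegStep [seg] l = [seg ++ [l]] from by
          unfold pvSegStep; rw [if_neg (by simpa using h)]; rfl,
        ih (seg ++ [l])]
      have hrec : pvRecord (seg ++ [l]) = pvUpd (pvRecord seg) l := by
        unfold pvRecord; rw [List.foldl_append]; rfl
      simp [pvParse, h, hrec]

-- ===== VERDICT (by name: the statement is the Claim_ definition above) =====
theorem manual_parse_response_spec : Claim_equal_manual_parse_response := by
  intro response _
  unfold Spec_manual_parse_response manual_parse_response manual_parse_response_alt
  dsimp only
  rw [pvB_fold, pvA_fold]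
  rfl
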